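-- pv_equiv track=rewrite | github.com/stuart-presnell/Advent2023 | Puzzle20/utils.py | nwise_cycled
-- ===== SOURCE A (Python) =====
-- def nwise_cycled(L, n=3):
--   '''Given a list `L`, return a list of all consecutive triples, cycling around the end of the list:
--   `[L[0],L[1],L[2]]`,
--   `[L[1],L[2],L[3]]`, ...,
--   `[L[-2],L[-1],L[0]]`,
--   `[L[-1],L[0],L[1]]`.
--   For `n`-tuples instead of triples, pass `n` as an optional argument.'''
--   m = len(L)
--   if m < n:  # If there are no triples...
--     return []
--   op = []
--   for i in range(m):
--     x = [L[(i+k)%m] for k in range(n)]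
--     op.append(x)
--   return op
-- ===== SOURCE B (Python) =====
-- def nwise_cycled(L, n=3):
--   '''Given a list `L`, return a list of all consecutive n-tuples, cycling
--   around the end of the list. For n-tuples other than triples, pass `n`.'''
--   m = len(L)
--   if n < 1 or m < n:
--     return []
--   L2 = L + L[:n-1]
--   return [L2[i:i+n] for i in range(m)]
-- ===== Notes on version B (the rewrite author's own statement) =====
-- stated objective: simpler
-- what changed: Replaces A's per-element modular indexing L[(i+k)%m] with an inner comprehension by building the augmented list L2 = L + L[:n-1] once and emitting each window as a single slice L2[i:i+n].
-- outside the precondition, e.g. on nwise_cycled([1, 2], 0): A returns [[], []], B returns []; on nwise_cycled([5], -2): A returns [[]], B returns []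
import Mathlib
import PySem

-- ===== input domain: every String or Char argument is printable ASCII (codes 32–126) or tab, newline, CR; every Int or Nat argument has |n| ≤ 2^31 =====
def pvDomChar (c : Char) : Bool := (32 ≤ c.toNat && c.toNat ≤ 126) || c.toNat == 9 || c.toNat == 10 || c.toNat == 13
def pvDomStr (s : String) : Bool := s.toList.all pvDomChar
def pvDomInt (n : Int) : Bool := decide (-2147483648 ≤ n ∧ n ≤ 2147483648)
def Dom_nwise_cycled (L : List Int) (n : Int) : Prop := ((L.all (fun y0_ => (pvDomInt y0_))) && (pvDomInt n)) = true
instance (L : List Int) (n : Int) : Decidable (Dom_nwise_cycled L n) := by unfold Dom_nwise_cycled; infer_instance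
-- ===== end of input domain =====

-- B replaces A's per-element modular indexing with one concatenate-then-slice pass
-- (L2 = L + L[:n-1], windows are plain slices of L2); objective: simpler.


-- ===== PORT A =====
-- Literal port of A: guard m < n, then a loop over range(m) appending the inner
-- comprehension [L[(i+k)%m] for k in range(n)].  The index (i+k) % m is always a
-- valid index when the inner range is nonempty (then m > 0), so pyGetD's default
-- is never consulted and the port is Python-exact.
def nwise_cycled (L : List Int) (n : Int) : List (List Int) :=
  let m : Int := L.length
  if m < n then []
  else
    (PySem.List.pyRange 0 m).foldl
      (fun op i => op ++ [(PySem.List.pyRange 0 n).map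
        (fun k => PySem.List.pyGetD L (PySem.Int.mod (i + k) m) 0)]) []

-- ===== PORT B =====
-- Literal port of B: guard, augmented list L2 = L ++ L[:n-1], windows as slices.
def nwise_cycled_alt (L : List Int) (n : Int) : List (List Int) :=
  let m : Int := L.length
  if n < 1 ∨ m < n then []
  else
    let L2 := L ++ PySem.List.slice L none (some (n - 1))
    (PySem.List.pyRange 0 m).map (fun i => PySem.List.slice L2 (some i) (some (i + n)))

-- ===== PRECONDITION & SPEC =====
-- Pre_ excludes n ≤ 0 with a nonempty L: a window size below 1 is a corner no caller
-- would specify, where A's list of len(L) empty windows (an empty inner range per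
-- position) and B's empty result are both defensible answers.
def Pre_nwise_cycled (L : List Int) (n : Int) : Prop := 1 ≤ n ∨ L = []
instance (L : List Int) (n : Int) : Decidable (Pre_nwise_cycled L n) := by unfold Pre_nwise_cycled; infer_instance
def pvWitness_nwise_cycled : List Int × Int := ([1, 2, 3, 4], 3)
def Spec_nwise_cycled (L : List Int) (n : Int) (out : List (List Int)) : Prop := out = nwise_cycled_alt L n
instance (L : List Int) (n : Int) (out : List (List Int)) : Decidable (Spec_nwise_cycled L n out) := by unfold Spec_nwise_cycled; infer_instance

-- ===== CLAIM (what is proved, stated in full; the proofs are below) =====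
def Claim_equal_nwise_cycled : Prop := ∀ (L : List Int) (n : Int), Dom_nwise_cycled L n → Pre_nwise_cycled L n → Spec_nwise_cycled L n (nwise_cycled L n)

-- ===== LEMMAS AND PROOFS =====

-- The heart of the equivalence: for a window start j < M and size 1 ≤ N ≤ M,
-- the modular-index window equals the slice of L ++ L.take (N-1) at j.
lemma window_eq_slice (L : List Int) (N j : Nat) (hN : 1 ≤ N)
    (hNM : N ≤ L.length) (hj : j < L.length) :
    List.map (fun k => L.getD ((j + k) % L.length) 0) (List.range N) =
      List.take N (List.drop j (L ++ L.take (N - 1))) := by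
  set M := L.length with hM
  have hlen2 : (L ++ L.take (N - 1)).length = M + (N - 1) := by
    simp [List.length_append, List.length_take]; omega
  apply List.ext_getElem
  · simp [hlen2]; omega
  · intro k hk1 hk2
    simp only [List.getElem_map, List.getElem_range, List.getElem_take, List.getElem_drop]
    have hkN : k < N := by simpa using hk1
    have hidx : (j + k) % M < M := Nat.mod_lt _ (by omega)
    rw [List.getD_eq_getElem _ _ hidx]
    by_cases hcase : j + k < M
    · have : (j + k) % M = j + k := Nat.mod_eq_of_lt hcase
      simp only [this]
      rw [List.getElem_append_left (by omega)]
    · have h2M : j + k < 2 * M := by omega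
      have hmod : (j + k) % M = j + k - M := by
        rw [Nat.mod_eq_sub_mod (by omega), Nat.mod_eq_of_lt (by omega)]
      simp only [hmod]
      rw [List.getElem_append_right (by omega)]
      simp only [List.getElem_take]
      congr 1

-- ===== VERDICT (by name: the statement is the Claim_ definition above) =====
theorem nwise_cycled_spec : Claim_equal_nwise_cycled := by
  intro L n _ hpre
  unfold Spec_nwise_cycled nwise_cycled nwise_cycled_alt
  rcases hpre with hn | hL
  · -- 1 ≤ n
    obtain ⟨N, rfl⟩ : ∃ N : Nat, n = (N : Int) := ⟨n.toNat, by omega⟩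
    have hN : 1 ≤ N := by exact_mod_cast hn
    by_cases hmn : (L.length : Int) < (N : Int)
    · simp [hmn]
    · have hNM : N ≤ L.length := by exact_mod_cast not_lt.mp hmn
      have hguard : ¬ ((N : Int) < 1 ∨ (L.length : Int) < (N : Int)) := by
        rw [not_or]; exact ⟨by omega, hmn⟩
      rw [if_neg hmn, if_neg hguard]
      rw [PySem.List.foldl_append_singleton_eq_map, List.nil_append,
        PySem.List.pyRange_zero_natCast, PySem.List.pyRange_zero_natCast,
        List.map_map, List.map_map]
      apply List.map_congr_left
      intro j hj
      have hjM : j < L.length := List.mem_range.mp hj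
      simp only [Function.comp]
      -- rewrite the slice bound n - 1 and the slice itself into take/drop form
      have hsl : PySem.List.slice L none (some ((N : Int) - 1)) = L.take (N - 1) := by
        rw [show ((N : Int) - 1) = ((N - 1 : Nat) : Int) by omega, PySem.List.slice_to _ (by positivity)]
        simp
      have hsl2 : PySem.List.slice (L ++ L.take (N - 1)) (some (j : Int)) (some ((j : Int) + (N : Int))) =
          List.take N (List.drop j (L ++ L.take (N - 1))) := by
        rw [show ((j : Int) + (N : Int)) = ((j + N : Nat) : Int) by push_cast; ring,
          PySem.List.slice_natCast]
        congr 1; omega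
      rw [hsl, hsl2, ← window_eq_slice L N j hN hNM hjM, List.map_map]
      apply List.map_congr_left
      intro k hk
      have hkN : k < N := List.mem_range.mp hk
      simp only [Function.comp]
      have : PySem.Int.mod ((j : Int) + (k : Int)) (L.length : Int) = (((j + k) % L.length : Nat) : Int) := by
        rw [show ((j : Int) + (k : Int)) = ((j + k : Nat) : Int) by push_cast; ring]
        exact PySem.Int.mod_natCast _ _
      rw [this, PySem.List.pyGetD_natCast]
  · -- L = []
    subst hL
    by_cases h0 : (0 : Int) < n
    · simp [h0]
    · simp [PySem.List.pyRange, show (n < 1) by omega]
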